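-- pv_equiv track=rewrite | github.com/opelr/actiwatch | actiwatch/helpers.py | make_sleep_interval
-- ===== SOURCE A (Python) =====
-- from itertools import groupby, chain
-- from typing import Iterable
--
-- def encode(sequence: Iterable):
--     """Enumerate continuous observations in a sequence
--
--     Args:
--         sequence (Iterable): Sequence to enumerate
--     """
--     return [[len(list(g)), k] for k, g in groupby(sequence)]
--
-- def decode(encode_obj: list):
--     """Reconstruct `encoded` sequence
--
--     Args:
--         encode_obj (list): Encode object (from `encode`) to stitch together
--     """
--     nested = [[c] * n for n, c in encode_obj]
--     return list(chain(*nested))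
--
-- def make_sleep_interval(vec):
--     """Convert manually-scored sleep data to correct interval
--
--     Args:
--         vec ([type]): [description]
--     """
--     sleep_rle = encode(vec)
--     if len(sleep_rle) > 4:
--         for i in sleep_rle[1::4]:
--             i[1] = "Falling_Asleep"
--
--         for i in sleep_rle[2::4]:
--             i[1] = "Rest"
--
--         for i in sleep_rle[3::4]:
--             i[1] = "Waking_Up"
--
--     return decode(sleep_rle)
-- ===== SOURCE B (Python) =====
-- def make_sleep_interval(vec):
--     """Convert manually-scored sleep data to correct interval"""
--     # Count segments in one forward pass; no run-length list is ever built.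
--     segs = 0
--     prev = None
--     for x in vec:
--         if x != prev:
--             segs += 1
--         prev = x
--     if segs <= 4:
--         return list(vec)
--     # Relabel element-wise: each element's new label depends only on its
--     # segment's index modulo 4, tracked with a running counter.
--     labels = {1: "Falling_Asleep", 2: "Rest", 3: "Waking_Up"}
--     out = []
--     idx = -1
--     prev = None
--     for x in vec:
--         if x != prev:
--             idx += 1
--         out.append(labels.get(idx % 4, x))
--         prev = x
--     return out
-- ===== Notes on version B (the rewrite author's own statement) =====
-- stated objective: alternative
-- what changed: B never builds a run-length list: it counts segments in one pass and, if more than 4, relabels the input element-wise with a running segment-index counter (label chosen by index mod 4), instead of A's run-length encode, three strided in-place relabel loops and chain-based decode.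
import Mathlib
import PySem

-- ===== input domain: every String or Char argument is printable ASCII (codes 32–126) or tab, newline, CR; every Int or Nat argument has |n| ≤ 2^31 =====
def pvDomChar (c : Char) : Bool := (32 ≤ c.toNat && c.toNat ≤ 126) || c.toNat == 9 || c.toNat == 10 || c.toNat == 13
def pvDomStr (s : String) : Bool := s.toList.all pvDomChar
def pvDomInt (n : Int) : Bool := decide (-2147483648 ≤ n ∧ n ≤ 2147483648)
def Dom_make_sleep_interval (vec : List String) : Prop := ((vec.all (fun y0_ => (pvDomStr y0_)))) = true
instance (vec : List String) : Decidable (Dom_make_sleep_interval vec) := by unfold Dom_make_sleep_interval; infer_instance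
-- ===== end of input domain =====

-- B never builds a run-length list: it counts segments in one pass and then relabels the input
-- element-wise with a running segment-index counter; objective: alternative, same return value.

-- ===== PORT A =====
-- encode: [[len(list(g)), k] for k, g in groupby(sequence)]  (structural recursion merging into the tail's groups)
def pvEncode : List String → List (Nat × String)
  | [] => []
  | x :: xs =>
    match pvEncode xs with
    | (n, k) :: rest => if k = x then (n + 1, x) :: rest else (1, x) :: (n, k) :: rest
    | [] => [(1, x)]

-- one strided pass 'for i in sleep_rle[r::4]: i[1] = lab' (in-place update of every 4th entry from r)
def pvRelabel (r : Nat) (lab : String) (rle : List (Nat × String)) : List (Nat × String) :=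
  rle.zipIdx.map (fun p => if p.2 % 4 = r then (p.1.1, lab) else p.1)

-- decode: nested = [[c] * n for n, c in encode_obj]; list(chain(*nested))
def pvDecode (rle : List (Nat × String)) : List String :=
  (rle.map (fun p => List.replicate p.1 p.2)).flatten

def make_sleep_interval (vec : List String) : List String :=
  let sleep_rle := pvEncode vec
  let sleep_rle :=
    if sleep_rle.length > 4 then
      pvRelabel 3 "Waking_Up" (pvRelabel 2 "Rest" (pvRelabel 1 "Falling_Asleep" sleep_rle))
    else sleep_rle
  pvDecode sleep_rle

-- ===== PORT B =====
-- labels.get(idx % 4, x)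
def altLab (m : Int) (x : String) : String :=
  if m = 1 then "Falling_Asleep" else if m = 2 then "Rest" else if m = 3 then "Waking_Up" else x

-- first loop: segs/prev accumulator ('x != prev' with prev=None initially ≡ some x ≠ prev)
def altSegStep (st : Nat × Option String) (x : String) : Nat × Option String :=
  if some x ≠ st.2 then (st.1 + 1, some x) else (st.1, some x)

-- second loop: out/idx/prev accumulator; idx starts at -1 as in Source B
def altLabStep (st : List String × Int × Option String) (x : String) : List String × Int × Option String :=
  let idx := if some x ≠ st.2.2 then st.2.1 + 1 else st.2.1
  (st.1 ++ [altLab (PySem.Int.mod idx 4) x], idx, some x)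

def make_sleep_interval_alt (vec : List String) : List String :=
  let segs := (vec.foldl altSegStep (0, none)).1
  if segs ≤ 4 then vec
  else (vec.foldl altLabStep ([], -1, none)).1

-- ===== PRECONDITION & SPEC =====
def Spec_make_sleep_interval (vec : List String) (out : List String) : Prop := out = make_sleep_interval_alt vec
instance (vec : List String) (out : List String) : Decidable (Spec_make_sleep_interval vec out) := by unfold Spec_make_sleep_interval; infer_instance

-- ===== CLAIM (what is proved, stated in full; the proofs are below) =====
def Claim_equal_make_sleep_interval : Prop := ∀ (vec : List String), Dom_make_sleep_interval vec → Spec_make_sleep_interval vec (make_sleep_interval vec)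

-- ===== LEMMAS AND PROOFS =====

-- prepend a pending run (p, c) onto an encoded list, merging with the first group when keys match
def consRun (p : String) (c : Nat) : List (Nat × String) → List (Nat × String)
  | (n, k) :: rest => if k = p then (c + n, p) :: rest else (c, p) :: (n, k) :: rest
  | [] => [(c, p)]

-- front-to-back encoder with pending run; proof device relating the folds to pvEncode
def encodeF (p : String) (c : Nat) : List String → List (Nat × String)
  | [] => [(c, p)]
  | x :: xs => if x = p then encodeF p (c + 1) xs else (c, p) :: encodeF x 1 xs

-- Nat-indexed label (A's zipIdx side)
def labNat (i : Nat) (k : String) : String :=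
  match i % 4 with
  | 1 => "Falling_Asleep"
  | 2 => "Rest"
  | 3 => "Waking_Up"
  | _ => k

-- relabel-and-decode of an encoded list starting at segment index i
def labAll (i : Int) : List (Nat × String) → List String
  | [] => []
  | (n, k) :: rest => List.replicate n (altLab (PySem.Int.mod i 4) k) ++ labAll (i + 1) rest

lemma pvEncode_cons (x : String) (xs : List String) :
    pvEncode (x :: xs) = consRun x 1 (pvEncode xs) := by
  cases he : pvEncode xs with
  | nil => simp [pvEncode, he, consRun]
  | cons hd tl =>
    obtain ⟨n, k⟩ := hd
    by_cases hk : k = x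
    · simp only [pvEncode, he, consRun, if_pos hk]
      congr 2
      omega
    · simp [pvEncode, he, consRun, hk]

lemma consRun_consRun (p : String) (c d : Nat) (l : List (Nat × String)) :
    consRun p c (consRun p d l) = consRun p (c + d) l := by
  cases l with
  | nil => simp [consRun]
  | cons hd tl =>
    obtain ⟨n, k⟩ := hd
    by_cases hk : k = p <;> simp [consRun, hk, Nat.add_assoc]

lemma consRun_consRun_ne (p x : String) (hxp : x ≠ p) (c d : Nat) (l : List (Nat × String)) :
    consRun p c (consRun x d l) = (c, p) :: consRun x d l := by
  cases l with
  | nil => simp [consRun, hxp]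
  | cons hd tl =>
    obtain ⟨n, k⟩ := hd
    by_cases hk : k = x <;> simp [consRun, hk, hxp]

lemma encodeF_eq (xs : List String) :
    ∀ (p : String) (c : Nat), encodeF p c xs = consRun p c (pvEncode xs) := by
  induction xs with
  | nil => intro p c; rfl
  | cons x xs ih =>
    intro p c
    rw [pvEncode_cons]
    by_cases hxp : x = p
    · subst hxp
      rw [show encodeF x c (x :: xs) = encodeF x (c + 1) xs from by simp [encodeF], ih,
        consRun_consRun]
    · rw [show encodeF p c (x :: xs) = (c, p) :: encodeF x 1 xs from by simp [encodeF, hxp], ih,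
        consRun_consRun_ne p x hxp]

lemma pvEncode_cons' (x : String) (xs : List String) :
    pvEncode (x :: xs) = encodeF x 1 xs := by
  rw [encodeF_eq, pvEncode_cons]

-- decode ∘ encode = id
lemma decode_consRun (x : String) (l : List (Nat × String)) :
    pvDecode (consRun x 1 l) = x :: pvDecode l := by
  cases l with
  | nil => simp [consRun, pvDecode]
  | cons hd tl =>
    obtain ⟨n, k⟩ := hd
    by_cases hk : k = x
    · subst hk
      simp [consRun, pvDecode, show 1 + n = n + 1 from Nat.add_comm 1 n, List.replicate_succ]
    · simp [consRun, pvDecode, hk]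

lemma decode_encode (vec : List String) : pvDecode (pvEncode vec) = vec := by
  induction vec with
  | nil => rfl
  | cons x xs ih => rw [pvEncode_cons, decode_consRun, ih]

-- segment counting: the first fold computes the length of the run-length encoding
lemma seg_count (xs : List String) :
    ∀ (p : String) (c k : Nat),
      (xs.foldl altSegStep (k, some p)).1 + 1 = k + (encodeF p c xs).length := by
  induction xs with
  | nil => intro p c k; simp [encodeF]
  | cons x xs ih =>
    intro p c k
    by_cases hxp : x = p
    · subst hxp
      rw [List.foldl_cons, show altSegStep (k, some x) x = (k, some x) from by
        simp [altSegStep], ih x (c + 1) k, show encodeF x c (x :: xs) = encodeF x (c + 1) xs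
        from by simp [encodeF]]
    · rw [List.foldl_cons, show altSegStep (k, some p) x = (k + 1, some x) from by
        simp [altSegStep, hxp], ih x 1 (k + 1), show encodeF p c (x :: xs) =
        (c, p) :: encodeF x 1 xs from by simp [encodeF, hxp]]
      simp
      omega

lemma seg_count_top (vec : List String) :
    (vec.foldl altSegStep (0, none)).1 = (pvEncode vec).length := by
  cases vec with
  | nil => rfl
  | cons x xs =>
    rw [List.foldl_cons, show altSegStep (0, none) x = (1, some x) from rfl, pvEncode_cons']
    have := seg_count xs x 1 1
    omega

-- one more copy of the pending run prepends one more label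
lemma labAll_pending (xs : List String) :
    ∀ (p : String) (c : Nat) (i : Int),
      labAll i (encodeF p (c + 1) xs) = altLab (PySem.Int.mod i 4) p :: labAll i (encodeF p c xs) := by
  induction xs with
  | nil => intro p c i; simp [encodeF, labAll, List.replicate_succ]
  | cons x xs ih =>
    intro p c i
    by_cases hxp : x = p
    · subst hxp
      rw [show encodeF x (c + 1) (x :: xs) = encodeF x (c + 2) xs from by simp [encodeF],
        show encodeF x c (x :: xs) = encodeF x (c + 1) xs from by simp [encodeF], ih]
    · rw [show encodeF p (c + 1) (x :: xs) = (c + 1, p) :: encodeF x 1 xs from by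
        simp [encodeF, hxp], show encodeF p c (x :: xs) = (c, p) :: encodeF x 1 xs from by
        simp [encodeF, hxp]]
      simp [labAll, List.replicate_succ]

-- the second fold computes labAll over the encoding
lemma lab_fold (xs : List String) :
    ∀ (p : String) (i : Int) (out : List String),
      (xs.foldl altLabStep (out, i, some p)).1 = out ++ labAll i (encodeF p 0 xs) := by
  induction xs with
  | nil => intro p i out; simp [encodeF, labAll]
  | cons x xs ih =>
    intro p i out
    by_cases hxp : x = p
    · subst hxp
      rw [List.foldl_cons, show altLabStep (out, i, some x) x =
        (out ++ [altLab (PySem.Int.mod i 4) x], i, some x) from by simp [altLabStep], ih,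
        show encodeF x 0 (x :: xs) = encodeF x 1 xs from by simp [encodeF],
        show (1 : Nat) = 0 + 1 from rfl, labAll_pending]
      simp
    · rw [List.foldl_cons, show altLabStep (out, i, some p) x =
        (out ++ [altLab (PySem.Int.mod (i + 1) 4) x], i + 1, some x) from by
        simp [altLabStep, hxp], ih,
        show encodeF p 0 (x :: xs) = (0, p) :: encodeF x 1 xs from by simp [encodeF, hxp],
        show labAll i ((0, p) :: encodeF x 1 xs) = labAll (i + 1) (encodeF x 1 xs) from by
        simp [labAll],
        show (1 : Nat) = 0 + 1 from rfl, labAll_pending]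
      simp

lemma lab_fold_top (x : String) (xs : List String) :
    ((x :: xs).foldl altLabStep ([], -1, none)).1 = labAll 0 (pvEncode (x :: xs)) := by
  rw [List.foldl_cons, show altLabStep ([], -1, none) x =
    ([altLab (PySem.Int.mod 0 4) x], 0, some x) from by simp [altLabStep], lab_fold,
    pvEncode_cons', show (1 : Nat) = 0 + 1 from rfl, labAll_pending]
  simp

-- the two Int/Nat label functions agree on cast indices
lemma altLab_natCast (n : Nat) (k : String) :
    altLab (PySem.Int.mod (n : Int) 4) k = labNat n k := by
  rw [show ((4 : Int)) = ((4 : Nat) : Int) from rfl, PySem.Int.mod_natCast]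
  unfold altLab labNat
  have h4 : n % 4 = 0 ∨ n % 4 = 1 ∨ n % 4 = 2 ∨ n % 4 = 3 := by omega
  rcases h4 with h | h | h | h <;> simp [h]

-- composing two index-wise relabel passes (same starting index) into one
lemma map_zipIdx_comp {α : Type} (h1 h2 : α × Nat → α) :
    ∀ (l : List α) (n : Nat),
      (((l.zipIdx n).map h1).zipIdx n).map h2 = (l.zipIdx n).map (fun p => h2 (h1 p, p.2)) := by
  intro l
  induction l with
  | nil => intro n; simp
  | cons x xs ih => intro n; simp [List.zipIdx_cons, ih (n + 1)]

lemma relabel_comb (l : List (Nat × String)) :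
    pvRelabel 3 "Waking_Up" (pvRelabel 2 "Rest" (pvRelabel 1 "Falling_Asleep" l))
      = l.zipIdx.map (fun p => (p.1.1, labNat p.2 p.1.2)) := by
  unfold pvRelabel
  rw [map_zipIdx_comp
        (fun p : (Nat × String) × Nat => if p.2 % 4 = 1 then (p.1.1, "Falling_Asleep") else p.1)
        (fun p : (Nat × String) × Nat => if p.2 % 4 = 2 then (p.1.1, "Rest") else p.1),
      map_zipIdx_comp
        (fun p : (Nat × String) × Nat =>
          (fun q : (Nat × String) × Nat => if q.2 % 4 = 2 then (q.1.1, "Rest") else q.1)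
            ((fun q : (Nat × String) × Nat =>
                if q.2 % 4 = 1 then (q.1.1, "Falling_Asleep") else q.1) p, p.2))
        (fun p : (Nat × String) × Nat => if p.2 % 4 = 3 then (p.1.1, "Waking_Up") else p.1)]
  apply List.map_congr_left
  intro p _
  have h4 : p.2 % 4 = 0 ∨ p.2 % 4 = 1 ∨ p.2 % 4 = 2 ∨ p.2 % 4 = 3 := by omega
  rcases h4 with h | h | h | h <;> simp [h, labNat]

-- decode of the index-wise relabelled list is labAll
lemma decode_relabel (l : List (Nat × String)) :
    ∀ (n : Nat), pvDecode ((l.zipIdx n).map (fun p => (p.1.1, labNat p.2 p.1.2))) = labAll (n : Int) l := by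
  induction l with
  | nil => intro n; rfl
  | cons hd tl ih =>
    intro n
    obtain ⟨m, k⟩ := hd
    simp only [List.zipIdx_cons, List.map_cons, pvDecode, List.flatten, labAll]
    rw [altLab_natCast]
    congr 1
    have := ih (n + 1)
    simp only [pvDecode] at this
    rw [this]
    norm_num

-- ===== VERDICT (by name: the statement is the Claim_ definition above) =====
theorem make_sleep_interval_spec : Claim_equal_make_sleep_interval := by
  intro vec _
  unfold Spec_make_sleep_interval make_sleep_interval make_sleep_interval_alt
  show pvDecode (if (pvEncode vec).length > 4 then
        pvRelabel 3 "Waking_Up" (pvRelabel 2 "Rest" (pvRelabel 1 "Falling_Asleep" (pvEncode vec)))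
      else pvEncode vec)
    = if (vec.foldl altSegStep (0, none)).1 ≤ 4 then vec else (vec.foldl altLabStep ([], -1, none)).1
  rw [seg_count_top]
  by_cases hlen : (pvEncode vec).length > 4
  · rw [if_pos hlen, if_neg (by omega), relabel_comb, decode_relabel]
    cases vec with
    | nil => simp [pvEncode] at hlen
    | cons x xs => rw [lab_fold_top]; norm_num
  · rw [if_neg hlen, if_pos (by omega), decode_encode]
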